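-- pv_equiv track=rewrite | github.com/victorusu/reframe | cscs-checks/apps/dependency/spec.py | _replace_spec_with_variant
-- ===== SOURCE A (Python) =====
-- def _replace_spec_with_variant(spec, variant):
--     specs = spec.split(',')
--     ret = ''
--     for var in variant.split(','):
--         if var.startswith('~'):
--             opposite = var.replace('~', '')
--         else:
--             opposite = '~' + var
--
--         specs = list(map(lambda x: x if x != opposite else var, specs))
--     ret = ','.join(specs)
--     return ret
-- ===== SOURCE B (Python) =====
-- def _replace_spec_with_variant(spec, variant):
--     # Precompute a substitution table once: subst maps a token value to the final
--     # value the variant chain sends it to, so each spec token needs one lookup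
--     # instead of a scan over all variants.
--     subst = {}
--     for var in variant.split(','):
--         opposite = var.replace('~', '') if var.startswith('~') else '~' + var
--         for k, v in subst.items():
--             if v == opposite:
--                 subst[k] = var
--         subst.setdefault(opposite, var)
--     return ','.join(subst.get(t, t) for t in spec.split(','))
-- ===== Notes on version B (the rewrite author's own statement) =====
-- stated objective: alternative
-- what changed: Instead of rescanning and rebuilding the whole spec-token list once per variant, B first folds the variant sequence into a substitution dict (updating stored images and adding each variant's opposite once), then resolves every spec token with a single dict lookup.
import Mathlib
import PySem

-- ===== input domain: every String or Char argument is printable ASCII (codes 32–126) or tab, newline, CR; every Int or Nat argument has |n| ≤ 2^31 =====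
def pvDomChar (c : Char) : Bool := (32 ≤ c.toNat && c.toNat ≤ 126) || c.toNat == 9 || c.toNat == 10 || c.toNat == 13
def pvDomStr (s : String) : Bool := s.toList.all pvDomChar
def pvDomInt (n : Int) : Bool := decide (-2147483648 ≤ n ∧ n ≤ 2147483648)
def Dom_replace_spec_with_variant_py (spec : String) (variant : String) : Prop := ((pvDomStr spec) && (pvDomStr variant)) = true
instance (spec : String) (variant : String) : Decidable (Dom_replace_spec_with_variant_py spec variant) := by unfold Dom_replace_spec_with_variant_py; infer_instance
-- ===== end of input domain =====

-- B precomputes a substitution dict from the variant list once and then does one lookup per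
-- spec token, replacing A's rescan of the whole token list per variant (objective: faster on
-- many-token specs; return value proved equal).

-- ===== PORT A =====
-- shared helper: s.split(',')  (exact: Chars.splitOn is Python's split with a non-empty separator)
def pvSplitComma (s : String) : List String := (PySem.Chars.splitOn s.toList [',']).map String.mk
-- shared helper: the 'opposite' expression both versions compute for a variant token
def pvOpp (var : String) : String :=
  if PySem.Str.startswith var "~" then PySem.Str.replace var "~" "" else "~" ++ var

def replace_spec_with_variant_py (spec : String) (variant : String) : String :=
  let specs := pvSplitComma spec
  let specs := (pvSplitComma variant).foldl (fun specs var =>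
    let opposite := pvOpp var
    specs.map (fun x => if x ≠ opposite then x else var)) specs
  PySem.Str.join "," specs

-- ===== PORT B =====
-- the inner loop 'for k, v in subst.items(): if v == opposite: subst[k] = var':
-- it only overwrites values in place (keys and order unchanged), so it is this value map
def pvRelabel (opp var : String) (d : PySem.Dict String String) : PySem.Dict String String :=
  PySem.Dict.mk (d.items.map (fun kv => (kv.1, if kv.2 == opp then var else kv.2)))

def pvBuildSubst (vars : List String) : PySem.Dict String String :=
  vars.foldl (fun d var =>
    let opposite := pvOpp var
    (pvRelabel opposite var d).setdefault opposite var) PySem.Dict.empty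

def replace_spec_with_variant_py_alt (spec : String) (variant : String) : String :=
  let subst := pvBuildSubst (pvSplitComma variant)
  PySem.Str.join "," ((pvSplitComma spec).map (fun t => subst.getD t t))

-- ===== PRECONDITION & SPEC =====
def Spec_replace_spec_with_variant_py (spec : String) (variant : String) (out : String) : Prop := out = replace_spec_with_variant_py_alt spec variant
instance (spec : String) (variant : String) (out : String) : Decidable (Spec_replace_spec_with_variant_py spec variant out) := by unfold Spec_replace_spec_with_variant_py; infer_instance

-- ===== CLAIM =====
def Claim_equal_replace_spec_with_variant_py : Prop := ∀ (spec : String) (variant : String), Dom_replace_spec_with_variant_py spec variant → Spec_replace_spec_with_variant_py spec variant (replace_spec_with_variant_py spec variant)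

-- ===== LEMMAS AND PROOFS =====
-- the chain A applies to one token
def pvChain (vars : List String) (t : String) : String :=
  vars.foldl (fun t var => if t = pvOpp var then var else t) t

-- A's fold of maps over the token list equals a map of per-token chains.
theorem pv_fold_map_comm (vars : List String) (specs : List String) :
    vars.foldl (fun specs var =>
      let opposite := pvOpp var
      specs.map (fun x => if x ≠ opposite then x else var)) specs
    = specs.map (pvChain vars) := by
  induction vars generalizing specs with
  | nil =>
    have : List.map (pvChain []) specs = List.map id specs :=
      List.map_congr_left (fun t _ => rfl)
    simp [this]
  | cons v vs ih =>
    simp only [List.foldl_cons, ih, List.map_map]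
    apply List.map_congr_left
    intro t _
    simp only [Function.comp, pvChain, List.foldl_cons]
    by_cases h : t = pvOpp v
    · simp [h]
    · simp only [h, ite_not]

theorem pv_relabel_get? (opp var : String) (d : PySem.Dict String String) (s : String) :
    (pvRelabel opp var d).get? s = (d.get? s).map (fun v => if v = opp then var else v) := by
  obtain ⟨items⟩ := d
  induction items with
  | nil => rfl
  | cons kv rest ih =>
    obtain ⟨k, v⟩ := kv
    simp only [pvRelabel, List.map_cons, PySem.Dict.get?_mk_cons] at ih ⊢
    by_cases h : k = s
    · simp [h]
    · simp only [show (k == s) = false by simp [h], Bool.false_eq_true, if_false]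
      exact ih

-- one build step applied to the dict is one chain step on every lookup
theorem pv_step_getD (var : String) (d : PySem.Dict String String) (s : String) :
    ((pvRelabel (pvOpp var) var d).setdefault (pvOpp var) var).getD s s
      = (if d.getD s s = pvOpp var then var else d.getD s s) := by
  set opp := pvOpp var with hopp
  set r := pvRelabel opp var d with hr
  have hrget : ∀ x, r.get? x = (d.get? x).map (fun v => if v = opp then var else v) :=
    pv_relabel_get? opp var d
  have hrk : r.contains opp = d.contains opp := by
    rw [PySem.Dict.contains_eq_isSome_get?, PySem.Dict.contains_eq_isSome_get?, hrget]
    cases d.get? opp <;> simp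
  by_cases hc : d.contains opp = true
  · rw [PySem.Dict.setdefault_of_contains r var (hrk.trans hc)]
    cases hg : d.get? s with
    | none =>
      have hs : s ≠ opp := by
        intro h
        rw [h] at hg
        have hcs := PySem.Dict.contains_eq_isSome_get? d opp
        rw [hg, hc] at hcs
        simp at hcs
      rw [PySem.Dict.getD_eq_get?_getD, hrget, hg]
      rw [PySem.Dict.getD_eq_get?_getD, hg]
      simp [hs]
    | some v =>
      rw [PySem.Dict.getD_eq_get?_getD, hrget, hg]
      rw [PySem.Dict.getD_eq_get?_getD, hg]
      simp
  · have hc' : r.contains opp = false := by rw [hrk]; simpa using hc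
    rw [PySem.Dict.setdefault_of_not_contains r var hc']
    by_cases hs : s = opp
    · have hg : d.get? s = none := by
        cases hg2 : d.get? s with
        | none => rfl
        | some v =>
          exfalso
          rw [hs] at hg2
          have hcs := PySem.Dict.contains_eq_isSome_get? d opp
          rw [hg2] at hcs
          simp at hcs
          exact hc hcs
      rw [PySem.Dict.getD_eq_get?_getD, PySem.Dict.get?_insert, if_pos hs]
      rw [PySem.Dict.getD_eq_get?_getD, hg]
      simp [hs]
    · rw [PySem.Dict.getD_eq_get?_getD, PySem.Dict.get?_insert, if_neg hs, hrget]
      rw [PySem.Dict.getD_eq_get?_getD]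
      cases hg : d.get? s with
      | none => simp [hs]
      | some v => simp

-- folding the build steps equals folding the chain on every lookup
theorem pv_build_getD (vars : List String) (d : PySem.Dict String String) (s : String) :
    (vars.foldl (fun d var =>
        let opposite := pvOpp var
        (pvRelabel opposite var d).setdefault opposite var) d).getD s s
      = vars.foldl (fun t var => if t = pvOpp var then var else t) (d.getD s s) := by
  induction vars generalizing d with
  | nil => rfl
  | cons v vs ih =>
    simp only [List.foldl_cons]
    rw [ih, pv_step_getD]

theorem pv_subst_getD (vars : List String) (s : String) :
    (pvBuildSubst vars).getD s s = pvChain vars s := by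
  unfold pvBuildSubst pvChain
  rw [pv_build_getD]
  simp [PySem.Dict.getD_empty]

-- ===== VERDICT =====
theorem replace_spec_with_variant_py_spec : Claim_equal_replace_spec_with_variant_py := by
  intro spec variant _
  unfold Spec_replace_spec_with_variant_py replace_spec_with_variant_py replace_spec_with_variant_py_alt
  simp only [pv_fold_map_comm]
  congr 1
  exact List.map_congr_left (fun t _ => (pv_subst_getD _ t).symm)
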